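-- pv_equiv track=rewrite | github.com/guntsvzz/Paraphase-Generation-with-Non-Parallel-Data | 06 - Deployment.py | deleaf
-- ===== SOURCE A (Python) =====
-- def is_paren(tok):
--     return tok == ")" or tok == "("
--
-- def deleaf(tree):
--     nonleaves = ''
--     for w in str(tree).replace('\n', '').split():
--         w = w.replace('(', '( ').replace(')', ' )')
--         nonleaves += w + ' '
--
--     arr = nonleaves.split()
--     for n, i in enumerate(arr):
--         if n + 1 < len(arr):
--             tok1 = arr[n]
--             tok2 = arr[n + 1]
--             if not is_paren(tok1) and not is_paren(tok2):
--                 arr[n + 1] = ""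
--
--     nonleaves = " ".join(arr)
--     return nonleaves.split()
-- ===== SOURCE B (Python) =====
-- def deleaf(tree):
--     toks = []
--     for w in str(tree).replace('\n', '').split():
--         toks += w.replace('(', '( ').replace(')', ' )').split()
--     out = []
--     prev_is_paren = True
--     for t in toks:
--         if t == '(' or t == ')' or prev_is_paren:
--             out.append(t)
--         prev_is_paren = t == '(' or t == ')'
--     return out
-- ===== Notes on version B (the rewrite author's own statement) =====
-- stated objective: simpler
-- what changed: A builds one big space-joined string, re-splits it, blanks non-first tokens of non-paren runs in an indexed in-place pass, then joins and splits again; B collects the tokens directly and makes a single forward pass with a prev-is-paren flag, appending only kept tokens.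
import Mathlib
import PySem

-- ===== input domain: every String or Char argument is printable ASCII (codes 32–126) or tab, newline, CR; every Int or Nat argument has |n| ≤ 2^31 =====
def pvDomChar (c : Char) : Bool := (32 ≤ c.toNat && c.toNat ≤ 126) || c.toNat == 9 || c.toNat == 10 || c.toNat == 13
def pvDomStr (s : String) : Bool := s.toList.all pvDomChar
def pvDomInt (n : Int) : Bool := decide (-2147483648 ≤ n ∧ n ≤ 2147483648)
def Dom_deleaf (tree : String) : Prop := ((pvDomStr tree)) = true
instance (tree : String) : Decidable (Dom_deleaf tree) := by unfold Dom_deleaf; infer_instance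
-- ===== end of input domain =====

-- B replaces A's build-string/split/blank-in-place/join/split pipeline by one forward pass
-- over the token list with a previous-token-is-paren flag (objective: simpler).


-- ===== PORT A =====
def isParen (tok : String) : Bool := tok == ")" || tok == "("

-- the body of A's second loop (one step of the in-place blanking pass)
def stepA (arr : List String) (n : Nat) : List String :=
  if n + 1 < arr.length then
    let tok1 := arr.getD n ""
    let tok2 := arr.getD (n + 1) ""
    if !(isParen tok1) && !(isParen tok2) then arr.set (n + 1) "" else arr
  else arr

def deleaf (tree : String) : List String :=
  let nonleaves := (PySem.Str.split₀ (PySem.Str.replace tree "\n" "")).foldl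
    (fun acc w => acc ++ (PySem.Str.replace (PySem.Str.replace w "(" "( ") ")" " )") ++ " ") ""
  let arr := PySem.Str.split₀ nonleaves
  -- 'for n, i in enumerate(arr)': only the index n is used (arr is re-read inside), so the loop runs over range(len(arr))
  let arr := (List.range arr.length).foldl stepA arr
  PySem.Str.split₀ (PySem.Str.join " " arr)

-- ===== PORT B =====
def deleaf_alt (tree : String) : List String :=
  let toks := (PySem.Str.split₀ (PySem.Str.replace tree "\n" "")).foldl
    (fun acc w => acc ++ PySem.Str.split₀ (PySem.Str.replace (PySem.Str.replace w "(" "( ") ")" " )")) ([] : List String)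
  (toks.foldl (fun (p : List String × Bool) t =>
      (if t == "(" || t == ")" || p.2 then p.1 ++ [t] else p.1, t == "(" || t == ")"))
    (([] : List String), true)).1

-- ===== PRECONDITION & SPEC =====
def Spec_deleaf (tree : String) (out : List String) : Prop := out = deleaf_alt tree
instance (tree : String) (out : List String) : Decidable (Spec_deleaf tree out) := by unfold Spec_deleaf; infer_instance

-- ===== CLAIM (what is proved, stated in full; the proofs are below) =====
def Claim_equal_deleaf : Prop := ∀ (tree : String), Dom_deleaf tree → Spec_deleaf tree (deleaf tree)

-- ===== LEMMAS AND PROOFS =====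

theorem go_nil (cur : List Char) (acc : List (List Char)) :
    PySem.Chars.split₀.go [] cur acc = if cur.isEmpty then acc.reverse else (cur.reverse :: acc).reverse := by
  rw [PySem.Chars.split₀.go]

theorem go_cons (c : Char) (rest cur : List Char) (acc : List (List Char)) :
    PySem.Chars.split₀.go (c :: rest) cur acc =
      if PySem.Chars.isspace c then (if cur.isEmpty then PySem.Chars.split₀.go rest [] acc
        else PySem.Chars.split₀.go rest [] (cur.reverse :: acc))
      else PySem.Chars.split₀.go rest (c :: cur) acc := by
  rw [PySem.Chars.split₀.go]

theorem go_acc (s : List Char) : ∀ (cur : List Char) (acc : List (List Char)),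
    PySem.Chars.split₀.go s cur acc = acc.reverse ++ PySem.Chars.split₀.go s cur [] := by
  induction s with
  | nil => intro cur acc; by_cases h : cur = [] <;> simp [go_nil, h]
  | cons c t ih =>
    intro cur acc
    by_cases hs : PySem.Chars.isspace c
    · by_cases h : cur = []
      · simp only [go_cons, hs, if_pos, h, List.isEmpty_nil]; exact ih [] acc
      · simp only [go_cons, hs, if_pos, List.isEmpty_iff, h]
        rw [ih [] (cur.reverse :: acc), ih [] [cur.reverse]]
        simp
    · simp only [go_cons, hs, Bool.false_eq_true]
      exact ih _ _

theorem go_append_space (s : List Char) : ∀ (t cur : List Char),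
    PySem.Chars.split₀.go (s ++ ' ' :: t) cur [] =
      PySem.Chars.split₀.go s cur [] ++ PySem.Chars.split₀.go t [] [] := by
  induction s with
  | nil =>
    intro t cur
    by_cases h : cur = [] <;>
      simp [go_cons, go_nil, h, go_acc t [] [List.reverse cur], (by decide : PySem.Chars.isspace ' ' = true)]
  | cons c s' ih =>
    intro t cur
    by_cases hs : PySem.Chars.isspace c
    · by_cases h : cur = []
      · simp only [List.cons_append, go_cons, hs, if_pos, h, List.isEmpty_nil]; exact ih t []
      · simp only [List.cons_append, go_cons, hs, if_pos, List.isEmpty_iff, h]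
        rw [go_acc (s' ++ ' ' :: t) [] [cur.reverse], go_acc s' [] [cur.reverse], ih]
        simp
    · simp only [List.cons_append, go_cons, hs, Bool.false_eq_true]
      exact ih t (c :: cur)

theorem split₀_append_space (s t : List Char) :
    PySem.Chars.split₀ (s ++ ' ' :: t) = PySem.Chars.split₀ s ++ PySem.Chars.split₀ t := by
  simp [PySem.Chars.split₀, go_append_space]

theorem go_nows (s : List Char) : ∀ (cur : List Char), (∀ c ∈ s, ¬ PySem.Chars.isspace c) →
    PySem.Chars.split₀.go s cur [] =
      (if cur.reverse ++ s = [] then [] else [cur.reverse ++ s]) := by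
  induction s with
  | nil => intro cur _; by_cases h : cur = [] <;> simp [go_nil, h]
  | cons c s' ih =>
    intro cur hws
    have hc := hws c (by simp)
    simp only [go_cons, hc, Bool.false_eq_true]
    rw [ih (c :: cur) (fun d hd => hws d (by simp [hd]))]
    simp

theorem split₀_nows (s : List Char) (h : ∀ c ∈ s, ¬ PySem.Chars.isspace c) :
    PySem.Chars.split₀ s = if s = [] then [] else [s] := by
  simpa [PySem.Chars.split₀] using go_nows s [] h

theorem go_tokens (s : List Char) : ∀ (cur : List Char) (acc : List (List Char)),
    (∀ c ∈ cur, ¬ PySem.Chars.isspace c) →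
    (∀ t ∈ acc, t ≠ [] ∧ ∀ c ∈ t, ¬ PySem.Chars.isspace c) →
    ∀ t ∈ PySem.Chars.split₀.go s cur acc, t ≠ [] ∧ ∀ c ∈ t, ¬ PySem.Chars.isspace c := by
  induction s with
  | nil =>
    intro cur acc hcur hacc t ht
    by_cases h : cur = []
    · simp [go_nil, h] at ht; exact hacc t (by simpa using ht)
    · simp only [go_nil, List.isEmpty_iff, h, if_neg, List.reverse_cons] at ht
      rcases (by simpa using ht : t ∈ acc ∨ t = cur.reverse) with h1 | h1
      · exact hacc t h1
      · subst h1; exact ⟨by simpa using h, fun c hc => hcur c (by simpa using hc)⟩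
  | cons c s' ih =>
    intro cur acc hcur hacc t ht
    by_cases hs : PySem.Chars.isspace c
    · rw [go_cons] at ht
      simp only [hs, if_pos] at ht
      by_cases h : cur = []
      · simp only [h, List.isEmpty_nil, if_pos] at ht
        exact ih [] acc (by simp) hacc t ht
      · simp only [List.isEmpty_iff, h, if_neg] at ht
        refine ih [] (cur.reverse :: acc) (by simp) ?_ t ht
        intro u hu
        rcases List.mem_cons.mp hu with h1 | h1
        · subst h1; exact ⟨by simpa using h, fun d hd => hcur d (by simpa using hd)⟩
        · exact hacc u h1
    · rw [go_cons] at ht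
      simp only [hs, Bool.false_eq_true, if_neg] at ht
      refine ih (c :: cur) acc ?_ hacc t ht
      intro d hd
      rcases List.mem_cons.mp hd with h1 | h1
      · subst h1; exact hs
      · exact hcur d h1

theorem split₀_tokens (s : List Char) :
    ∀ t ∈ PySem.Chars.split₀ s, t ≠ [] ∧ ∀ c ∈ t, ¬ PySem.Chars.isspace c := by
  intro t ht
  exact go_tokens s [] [] (by simp) (by simp) t (by simpa [PySem.Chars.split₀] using ht)

theorem split₀_intercalate (l : List (List Char))
    (h : ∀ t ∈ l, ∀ c ∈ t, ¬ PySem.Chars.isspace c) :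
    PySem.Chars.split₀ (List.intercalate [' '] l) = l.filter (· ≠ []) := by
  induction l with
  | nil => simp [PySem.Chars.split₀, List.intercalate, go_nil]
  | cons x r ih =>
    cases r with
    | nil =>
      rw [(by simp [List.intercalate] : List.intercalate [' '] [x] = x)]
      rw [split₀_nows x (h x (by simp))]
      by_cases hx : x = [] <;> simp [hx]
    | cons y r' =>
      have : List.intercalate [' '] (x :: y :: r') = x ++ ' ' :: List.intercalate [' '] (y :: r') := by
        simp [List.intercalate, List.intersperse]
      rw [this, split₀_append_space, split₀_nows x (h x (by simp)),
        ih (fun t ht c hc => h t (by simp [ht]) c hc)]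
      by_cases hx : x = [] <;> simp [hx]

def blanks : List String → Bool → List String
  | [], _ => []
  | t :: ts, prev => (if isParen t || prev then t else "") :: blanks ts (isParen t)

def flagPass : List String → Bool → List String
  | [], _ => []
  | t :: ts, prev => (if isParen t || prev then [t] else []) ++ flagPass ts (isParen t)

def blankHead : List String → List String
  | [] => []
  | b :: l => (if isParen b then b else "") :: l

def loopA (xs : List String) : List String := (List.range xs.length).foldl stepA xs

def step1 (a : String) (l : List String) : List String :=
  if isParen a then l else blankHead l

theorem stepA_cons (h : String) (t : List String) (n : Nat) :
    stepA (h :: t) (n + 1) = h :: stepA t n := by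
  simp only [stepA, List.length_cons, List.getD_cons_succ, List.set_cons_succ]
  by_cases hl : n + 1 < t.length
  · simp only [hl, if_pos, (by omega : n + 1 + 1 < t.length + 1), if_pos]
    split <;> rfl
  · simp [hl, (by omega : ¬ (n + 1 + 1 < t.length + 1))]

theorem foldl_stepA_succ (l : List Nat) : ∀ (h : String) (t : List String),
    l.foldl (fun arr n => stepA arr (n + 1)) (h :: t) = h :: l.foldl stepA t := by
  induction l with
  | nil => intro h t; rfl
  | cons n l' ih => intro h t; simp only [List.foldl_cons, stepA_cons]; exact ih h _

theorem stepA_zero (a : String) (l : List String) : stepA (a :: l) 0 = a :: step1 a l := by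
  cases l with
  | nil => simp [stepA, step1, blankHead]
  | cons b l' =>
    simp only [stepA, step1, blankHead, List.length_cons,
      if_pos (by omega : 0 + 1 < l'.length + 1 + 1),
      List.getD_cons_zero, List.getD_cons_succ, List.set_cons_succ, List.set_cons_zero]
    by_cases ha : isParen a
    · simp [ha]
    · simp only [ha, Bool.not_false, Bool.true_and]
      by_cases hb : isParen b <;> simp [hb]

theorem step1_length (a : String) (l : List String) : (step1 a l).length = l.length := by
  cases l <;> simp [step1, blankHead] <;> split <;> simp

theorem loopA_cons (a : String) (l : List String) : loopA (a :: l) = a :: loopA (step1 a l) := by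
  unfold loopA
  rw [List.length_cons, List.range_succ_eq_map, List.foldl_cons, stepA_zero, List.foldl_map,
    foldl_stepA_succ, step1_length]

theorem isParen_blank (b : String) : isParen (if isParen b then b else "") = isParen b := by
  by_cases hb : isParen b <;> simp [hb] <;> simp [isParen] at hb ⊢ <;> decide

theorem loopA_eq_blanks (l : List String) : ∀ (prev : Bool),
    loopA (if prev then l else blankHead l) = blanks l prev := by
  induction l with
  | nil => intro prev; cases prev <;> simp [loopA, blankHead, blanks]
  | cons b l' ih =>
    intro prev
    cases prev
    · rw [if_neg (by simp), blankHead, loopA_cons, blanks]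
      have h1 : step1 (if isParen b then b else "") l' = if isParen b then l' else blankHead l' := by
        rw [step1, isParen_blank]
      rw [h1, ih (isParen b)]
      simp
    · rw [if_pos rfl, loopA_cons, blanks, step1, ih (isParen b)]
      simp

theorem blanks_mem (l : List String) : ∀ (p : Bool) (x : String), x ∈ blanks l p → x = "" ∨ x ∈ l := by
  induction l with
  | nil => intro p x hx; simp [blanks] at hx
  | cons b l' ih =>
    intro p x hx
    rw [blanks] at hx
    rcases List.mem_cons.mp hx with h1 | h1
    · split at h1
      · right; simp [h1]
      · left; exact h1
    · rcases ih (isParen b) x h1 with h2 | h2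
      · left; exact h2
      · right; simp [h2]

theorem blanks_filter (l : List String) : ∀ (p : Bool), (∀ t ∈ l, t ≠ "") →
    (blanks l p).filter (· ≠ "") = flagPass l p := by
  induction l with
  | nil => intro p _; simp [blanks, flagPass]
  | cons b l' ih =>
    intro p hl
    rw [blanks, flagPass]
    rw [List.filter_cons, ih (isParen b) (fun t ht => hl t (by simp [ht]))]
    by_cases hk : isParen b || p
    · simp [hk, hl b (by simp)]
    · simp [hk]

theorem foldl_stepB (l : List String) : ∀ (acc : List String) (prev : Bool),
    (l.foldl (fun (p : List String × Bool) t =>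
        (if t == "(" || t == ")" || p.2 then p.1 ++ [t] else p.1, t == "(" || t == ")"))
      (acc, prev)).1 = acc ++ flagPass l prev := by
  induction l with
  | nil => intro acc prev; simp [flagPass]
  | cons b l' ih =>
    intro acc prev
    rw [List.foldl_cons, flagPass]
    have hp : (b == "(" || b == ")") = isParen b := by rw [isParen, Bool.or_comm]
    simp only [hp]
    rw [ih]
    by_cases hk : isParen b || prev <;> simp [hk]

theorem foldA_toList (W : List String) : ∀ (a : String),
    (W.foldl (fun acc w => acc ++ (PySem.Str.replace (PySem.Str.replace w "(" "( ") ")" " )") ++ " ") a).toList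
      = W.foldl (fun acc w => acc ++ (PySem.Str.replace (PySem.Str.replace w "(" "( ") ")" " )").toList ++ [' ']) a.toList := by
  induction W with
  | nil => intro a; rfl
  | cons w W' ih =>
    intro a
    rw [List.foldl_cons, List.foldl_cons, ih]
    simp [String.toList_append]

theorem split₀_foldl_space (ws : List (List Char)) : ∀ (init : List Char),
    (init = [] ∨ ∃ p, init = p ++ [' ']) →
    PySem.Chars.split₀ (ws.foldl (fun acc w => acc ++ w ++ [' ']) init)
      = ws.foldl (fun acc w => acc ++ PySem.Chars.split₀ w) (PySem.Chars.split₀ init) := by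
  induction ws with
  | nil => intro init _; rfl
  | cons w ws' ih =>
    intro init hinit
    rw [List.foldl_cons, List.foldl_cons,
      ih (init ++ w ++ [' ']) (Or.inr ⟨init ++ w, by simp⟩)]
    congr 1
    rcases hinit with h | ⟨p, h⟩ <;> subst h
    · have : ([] : List Char) ++ w ++ [' '] = w ++ ' ' :: [] := by simp
      rw [this, split₀_append_space]
      simp [PySem.Chars.split₀, go_nil]
    · have h1 : p ++ [' '] ++ w ++ [' '] = p ++ ' ' :: (w ++ ' ' :: []) := by simp
      have h2 : p ++ [' '] = p ++ ' ' :: [] := by simp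
      rw [h1, h2, split₀_append_space, split₀_append_space, split₀_append_space]
      simp [PySem.Chars.split₀, go_nil]

theorem map_foldl_append (f : String → List String) (W : List String) : ∀ (l : List String),
    (W.foldl (fun acc w => acc ++ f w) l).map String.toList
      = W.foldl (fun acc w => acc ++ (f w).map String.toList) (l.map String.toList) := by
  induction W with
  | nil => intro l; rfl
  | cons w W' ih => intro l; rw [List.foldl_cons, List.foldl_cons, ih]; simp

theorem toList_inj : Function.Injective String.toList := by
  intro a b h; exact String.ext (by simpa [String.toList] using h)

theorem tokens_eq (W : List String) :
    PySem.Str.split₀ (W.foldl (fun acc w => acc ++ (PySem.Str.replace (PySem.Str.replace w "(" "( ") ")" " )") ++ " ") "")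
      = W.foldl (fun acc w => acc ++ PySem.Str.split₀ (PySem.Str.replace (PySem.Str.replace w "(" "( ") ")" " )")) [] := by
  apply (List.map_injective_iff.mpr toList_inj)
  rw [PySem.Str.split₀_map_toList, foldA_toList, String.toList_empty,
    (by rw [List.foldl_map] :
      ((W.map (fun w => (PySem.Str.replace (PySem.Str.replace w "(" "( ") ")" " )").toList)).foldl
        (fun acc w => acc ++ w ++ [' ']) ([] : List Char))
      = W.foldl (fun acc w => acc ++ (PySem.Str.replace (PySem.Str.replace w "(" "( ") ")" " )").toList ++ [' ']) ([] : List Char)).symm,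
    split₀_foldl_space _ [] (Or.inl rfl), List.foldl_map,
    map_foldl_append (fun w => PySem.Str.split₀ (PySem.Str.replace (PySem.Str.replace w "(" "( ") ")" " )")) W []]
  simp [PySem.Str.split₀_map_toList, PySem.Chars.split₀, go_nil]

theorem join_split (arr2 : List String)
    (h : ∀ t ∈ arr2, ∀ c ∈ t.toList, ¬ PySem.Chars.isspace c) :
    PySem.Str.split₀ (PySem.Str.join " " arr2) = arr2.filter (· ≠ "") := by
  apply (List.map_injective_iff.mpr toList_inj)
  rw [PySem.Str.split₀_map_toList, PySem.Str.toList_join]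
  have hj : PySem.Chars.join " ".toList (arr2.map String.toList) = List.intercalate [' '] (arr2.map String.toList) := rfl
  have hws : ∀ t ∈ arr2.map String.toList, ∀ c ∈ t, ¬ PySem.Chars.isspace c := by
    intro t ht c hc
    rcases List.mem_map.mp ht with ⟨s, hs, rfl⟩
    exact h s hs c hc
  rw [hj, split₀_intercalate _ hws, List.filter_map]
  congr 1
  apply List.filter_congr
  intro x _
  simp [String.toList_eq_nil_iff, Function.comp]

theorem deleaf_eq (tree : String) : deleaf tree = deleaf_alt tree := by
  unfold deleaf deleaf_alt
  simp only
  set W := PySem.Str.split₀ (PySem.Str.replace tree "\n" "") with hW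
  set nl := W.foldl (fun acc w => acc ++ (PySem.Str.replace (PySem.Str.replace w "(" "( ") ")" " )") ++ " ") "" with hnl
  set arr := PySem.Str.split₀ nl with harr
  -- tokens of arr: nonempty and whitespace-free
  have htok : ∀ t ∈ arr, t.toList ≠ [] ∧ ∀ c ∈ t.toList, ¬ PySem.Chars.isspace c := by
    intro t ht
    exact split₀_tokens nl.toList t.toList
      (by rw [← PySem.Str.split₀_map_toList]; exact List.mem_map_of_mem ht)
  have hne : ∀ t ∈ arr, t ≠ "" := by
    intro t ht h
    exact (htok t ht).1 (by simp [h])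
  -- A's loop is the blanking pass
  have hloop : (List.range arr.length).foldl stepA arr = blanks arr true := by
    have := loopA_eq_blanks arr true
    rw [if_pos rfl] at this
    exact this
  rw [hloop]
  -- join/split filters the blanks
  rw [join_split (blanks arr true) (by
    intro t ht c hc
    rcases blanks_mem arr true t ht with h | h
    · subst h; simp at hc
    · exact (htok t h).2 c hc)]
  rw [blanks_filter arr true hne]
  -- B's fold is the flag pass over the same tokens
  rw [foldl_stepB _ [] true, ← tokens_eq, List.nil_append, ← hnl, ← harr]

-- ===== VERDICT (by name: the statement is the Claim_ definition above) =====
theorem deleaf_spec : Claim_equal_deleaf := by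
  intro tree _
  unfold Spec_deleaf
  exact deleaf_eq tree
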